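-- pv_equiv track=rewrite | github.com/ardinusawan/Code | Hackerrank/Week of Code 36/RevisedRussianRoulette.py | revisedRussianRoulette
-- ===== SOURCE A (Python) =====
-- def revisedRussianRoulette(doors):
--     minimal=0
--     maximal=0
--     for index in range(len(doors)):
--         if(doors[index]==1):
--             doors[index] =0
--             minimal+=1
--             if(index!=len(doors)-1 and doors[index+1]==1):
--                 doors[index+1]=0
--                 maximal+=2
--
--             else:
--                 maximal+=1
--         else:
--             continue
--         #elif(doors[index]==1 and doors[index+1]==0):
--         #    minimal+=1
--         #    maximal+=1
--     return minimal, maximal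
-- ===== SOURCE B (Python) =====
-- def revisedRussianRoulette(doors):
--     # Note: unlike A, B does not mutate `doors`; the proved equivalence is about the return value.
--     maximal = doors.count(1)
--     minimal = 0
--     run = 0
--     for v in doors:
--         if v == 1:
--             run += 1
--         else:
--             minimal += (run + 1) // 2
--             run = 0
--     minimal += (run + 1) // 2
--     return minimal, maximal
-- ===== Notes on version B (the rewrite author's own statement) =====
-- stated objective: simpler
-- what changed: Replaces A's indexed pair-consuming scan with in-place zeroing by a closed form doors.count(1) for the second component and a run-length accumulator (ceil(run/2) per maximal run of 1s) for the first; B does not mutate the argument.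
import Mathlib
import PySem

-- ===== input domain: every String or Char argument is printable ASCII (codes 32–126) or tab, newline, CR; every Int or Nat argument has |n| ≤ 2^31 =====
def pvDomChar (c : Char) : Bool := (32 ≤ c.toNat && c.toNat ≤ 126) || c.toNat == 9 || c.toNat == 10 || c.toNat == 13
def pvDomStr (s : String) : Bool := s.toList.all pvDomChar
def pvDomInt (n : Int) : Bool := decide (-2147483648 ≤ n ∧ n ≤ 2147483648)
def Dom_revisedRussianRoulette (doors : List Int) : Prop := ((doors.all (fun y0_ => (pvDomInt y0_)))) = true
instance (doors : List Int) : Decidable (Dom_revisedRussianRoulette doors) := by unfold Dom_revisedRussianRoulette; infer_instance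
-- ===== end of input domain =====

-- B replaces A's indexed pair-consuming scan (which zeroes the list in place) by count(1)
-- plus a run-length accumulator; B does not mutate its argument (return values agree; A's
-- mutation is a side effect outside this claim).

-- ===== PORT A =====
-- one iteration of A's `for index in range(len(doors))` body; n = len(doors) (constant)
def aStep (n : Nat) (st : List Int × Int × Int) (index : Nat) : List Int × Int × Int :=
  let ds := st.1
  let minimal := st.2.1
  let maximal := st.2.2
  if (PySem.List.pyGet? ds (index : Int)).getD 0 = 1 then
    let ds := ds.set index 0
    let minimal := minimal + 1
    if index ≠ n - 1 ∧ (PySem.List.pyGet? ds ((index : Int) + 1)).getD 0 = 1 then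
      (ds.set (index + 1) 0, minimal, maximal + 2)
    else
      (ds, minimal, maximal + 1)
  else
    (ds, minimal, maximal)

def revisedRussianRoulette (doors : List Int) : Int × Int :=
  let fin := (List.range doors.length).foldl (aStep doors.length) (doors, (0 : Int), (0 : Int))
  (fin.2.1, fin.2.2)

-- ===== PORT B =====
-- one iteration of B's `for v in doors` body; state = (minimal, run)
def bStep (p : Int × Int) (v : Int) : Int × Int :=
  if v = 1 then (p.1, p.2 + 1)
  else (p.1 + PySem.Int.floordiv (p.2 + 1) 2, 0)

def revisedRussianRoulette_alt (doors : List Int) : Int × Int :=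
  let maximal : Int := PySem.List.count doors 1
  let p := doors.foldl bStep ((0 : Int), (0 : Int))
  (p.1 + PySem.Int.floordiv (p.2 + 1) 2, maximal)

-- ===== PRECONDITION & SPEC =====
def Spec_revisedRussianRoulette (doors : List Int) (out : Int × Int) : Prop := out = revisedRussianRoulette_alt doors
instance (doors : List Int) (out : Int × Int) : Decidable (Spec_revisedRussianRoulette doors out) := by unfold Spec_revisedRussianRoulette; infer_instance

-- ===== CLAIM (what is proved, stated in full; the proofs are below) =====
def Claim_equal_revisedRussianRoulette : Prop := ∀ (doors : List Int), Dom_revisedRussianRoulette doors → Spec_revisedRussianRoulette doors (revisedRussianRoulette doors)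

-- ===== LEMMAS AND PROOFS =====

-- reference form of B's minimal: sum of ceil(run/2) over maximal runs of 1s, carried run length
def runMin : List Int → Int → Int
  | [], run => PySem.Int.floordiv (run + 1) 2
  | v :: r, run =>
      if v = 1 then runMin r (run + 1)
      else PySem.Int.floordiv (run + 1) 2 + runMin r 0

theorem runMin_add_two (tl : List Int) (run : Int) :
    runMin tl (run + 2) = runMin tl run + 1 := by
  induction tl generalizing run with
  | nil =>
      simp only [runMin, add_right_comm run 2 1]
      rw [PySem.Int.floordiv_eq_ediv_of_pos (by omega),
        PySem.Int.floordiv_eq_ediv_of_pos (by omega)]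
      omega
  | cons v r ih =>
      by_cases hv : v = 1
      · simp [runMin, hv, add_right_comm run 2 1, ih]
      · simp only [runMin, hv, if_false, add_right_comm run 2 1]
        rw [PySem.Int.floordiv_eq_ediv_of_pos (by omega),
          PySem.Int.floordiv_eq_ediv_of_pos (by omega)]
        omega

theorem bFold_eq_runMin (tl : List Int) (mn run : Int) :
    (tl.foldl bStep (mn, run)).1 + PySem.Int.floordiv ((tl.foldl bStep (mn, run)).2 + 1) 2
      = mn + runMin tl run := by
  induction tl generalizing mn run with
  | nil => simp [runMin]
  | cons v r ih =>
      by_cases hv : v = 1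
      · simpa [bStep, runMin, hv] using ih mn (run + 1)
      · have h := ih (mn + PySem.Int.floordiv (run + 1) 2) 0
        simp only [bStep, runMin, hv, if_false, List.foldl_cons]
        rw [h]; ring

theorem runMin_cons_ne (b : Int) (r : List Int) (hb : b ≠ 1) :
    runMin (b :: r) 0 = runMin r 0 := by
  simp only [runMin, hb, if_false]
  rw [show PySem.Int.floordiv (0 + 1) 2 = 0 from by decide]
  ring

theorem runMin_cons_ne_one (b : Int) (r : List Int) (hb : b ≠ 1) :
    runMin (b :: r) 1 = 1 + runMin r 0 := by
  simp only [runMin, hb, if_false]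
  rw [show PySem.Int.floordiv (1 + 1) 2 = 1 from by decide]

-- the core invariant: running A's loop from index |pre| on pre ++ tl yields B's closed forms on tl
theorem aFold_eq (k : Nat) : ∀ (tl pre : List Int) (mn mx : Int), tl.length ≤ k →
    ((List.range' pre.length tl.length).foldl (aStep (pre.length + tl.length)) (pre ++ tl, mn, mx)).2
      = (mn + runMin tl 0, mx + (tl.count 1 : Int)) := by
  induction k with
  | zero =>
      intro tl pre mn mx h
      have : tl = [] := List.eq_nil_of_length_eq_zero (Nat.le_zero.mp h)
      subst this
      simp [runMin]
  | succ k ih =>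
      intro tl pre mn mx h
      match tl with
      | [] => simp [runMin]
      | a :: tl' =>
        rw [show List.range' pre.length (a :: tl').length
              = pre.length :: List.range' (pre.length + 1) tl'.length from rfl]
        simp only [List.foldl_cons]
        by_cases ha : a = 1
        · subst ha
          match tl' with
          | [] =>
            -- last element is a 1: unpaired
            have hstep : aStep (pre.length + ([1] : List Int).length) (pre ++ [1], mn, mx) pre.length
                = (pre ++ [0], mn + 1, mx + 1) := by
              have hget : PySem.List.pyGet? (pre ++ [1]) (pre.length : Int) = some 1 :=
                PySem.List.pyGet?_append_length pre [] 1
              have hset : (pre ++ [(1 : Int)]).set pre.length 0 = pre ++ [0] := by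
                rw [List.set_append_right _ _ (Nat.le_refl _)]
                simp
              simp [aStep, hset]
            rw [hstep]
            simp [runMin]
          | b :: tl'' =>
            have hne : pre.length ≠ pre.length + (1 :: b :: tl'').length - 1 := by
              simp
            have hset : (pre ++ 1 :: b :: tl'').set pre.length 0 = pre ++ 0 :: b :: tl'' := by
              rw [List.set_append_right _ _ (Nat.le_refl _)]
              simp
            by_cases hb : b = 1
            · subst hb
              -- a pair of adjacent 1s: both consumed
              have hget : PySem.List.pyGet? (pre ++ 1 :: 1 :: tl'') (pre.length : Int) = some 1 :=
                PySem.List.pyGet?_append_length pre (1 :: tl'') 1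
              have hget2 : PySem.List.pyGet? (pre ++ 0 :: 1 :: tl'') ((pre.length : Int) + 1)
                  = some 1 := by
                have h2 := PySem.List.pyGet?_append_length (pre := pre ++ [(0 : Int)]) (y := 1)
                  (ys := tl'')
                simpa [List.append_assoc, Nat.cast_add] using h2
              have hset2 : (pre ++ 0 :: 1 :: tl'').set (pre.length + 1) 0
                  = pre ++ 0 :: 0 :: tl'' := by
                rw [show pre ++ (0 : Int) :: 1 :: tl'' = (pre ++ [0]) ++ 1 :: tl'' from by simp,
                  show pre.length + 1 = (pre ++ [(0 : Int)]).length from by simp,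
                  List.set_append_right _ _ (Nat.le_refl _)]
                simp
              have hstep : aStep (pre.length + (1 :: 1 :: tl'').length)
                  (pre ++ 1 :: 1 :: tl'', mn, mx) pre.length
                  = (pre ++ 0 :: 0 :: tl'', mn + 1, mx + 2) := by
                simp only [aStep, hget, hset, hget2, hset2]
                simp
              rw [hstep]
              rw [show List.range' (pre.length + 1) (1 :: tl'').length
                    = (pre.length + 1) :: List.range' (pre.length + 1 + 1) tl''.length from rfl]
              simp only [List.foldl_cons]
              have hget3 : PySem.List.pyGet? (pre ++ 0 :: 0 :: tl'') ((pre.length : Int) + 1)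
                  = some 0 := by
                have h3 := PySem.List.pyGet?_append_length (pre := pre ++ [(0 : Int)]) (y := 0)
                  (ys := tl'')
                simpa [List.append_assoc, Nat.cast_add] using h3
              have hstep2 : aStep (pre.length + (1 :: 1 :: tl'').length)
                  (pre ++ 0 :: 0 :: tl'', mn + 1, mx + 2) (pre.length + 1)
                  = (pre ++ 0 :: 0 :: tl'', mn + 1, mx + 2) := by
                simp [aStep, Nat.cast_add, Nat.cast_one, hget3]

              rw [hstep2]
              have heq : pre ++ (0 : Int) :: 0 :: tl'' = (pre ++ [0, 0]) ++ tl'' := by simp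
              have hlen : pre.length + 1 + 1 = (pre ++ [(0 : Int), 0]).length := by simp
              have hlen2 : pre.length + (1 :: 1 :: tl'').length
                  = (pre ++ [(0 : Int), 0]).length + tl''.length := by simp; omega
              rw [heq, hlen, hlen2, ih tl'' (pre ++ [0, 0]) (mn + 1) (mx + 2)
                (by simp at h ⊢; omega)]
              rw [Prod.mk.injEq]
              constructor
              · have : runMin ((1 : Int) :: 1 :: tl'') 0 = runMin tl'' 0 + 1 := by
                  simpa [runMin] using runMin_add_two tl'' 0
                rw [this]; ring
              · simp
                ring
            · -- a 1 followed by a non-1: consumed alone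
              have hget : PySem.List.pyGet? (pre ++ 1 :: b :: tl'') (pre.length : Int) = some 1 :=
                PySem.List.pyGet?_append_length pre (b :: tl'') 1
              have hget2 : PySem.List.pyGet? (pre ++ 0 :: b :: tl'') ((pre.length : Int) + 1)
                  = some b := by
                have h2 := PySem.List.pyGet?_append_length (pre := pre ++ [(0 : Int)]) (y := b)
                  (ys := tl'')
                simpa [List.append_assoc, Nat.cast_add] using h2
              have hstep : aStep (pre.length + (1 :: b :: tl'').length)
                  (pre ++ 1 :: b :: tl'', mn, mx) pre.length
                  = (pre ++ 0 :: b :: tl'', mn + 1, mx + 1) := by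
                simp only [aStep, hset, hget2]
                simp [hb]
              rw [hstep]
              have heq : pre ++ (0 : Int) :: b :: tl'' = (pre ++ [0]) ++ (b :: tl'') := by simp
              have hlen : pre.length + 1 = (pre ++ [(0 : Int)]).length := by simp
              have hlen2 : pre.length + (1 :: b :: tl'').length
                  = (pre ++ [(0 : Int)]).length + (b :: tl'').length := by simp; omega
              rw [heq, hlen, hlen2, ih (b :: tl'') (pre ++ [0]) (mn + 1) (mx + 1)
                (by simp at h ⊢; omega)]
              rw [Prod.mk.injEq]
              constructor
              · have h1 : runMin ((1 : Int) :: b :: tl'') 0 = 1 + runMin tl'' 0 := by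
                  simpa [runMin] using runMin_cons_ne_one b tl'' hb
                rw [h1, runMin_cons_ne b tl'' hb]; ring
              · simp [hb]
                ring
        · -- a non-1 head: skipped
          have hstep : aStep (pre.length + (a :: tl').length) (pre ++ a :: tl', mn, mx) pre.length
              = (pre ++ a :: tl', mn, mx) := by
            simp [aStep, ha]
          rw [hstep]
          have heq : pre ++ a :: tl' = (pre ++ [a]) ++ tl' := by simp
          have hlen : pre.length + 1 = (pre ++ [a]).length := by simp
          have hlen2 : pre.length + (a :: tl').length = (pre ++ [a]).length + tl'.length := by
            simp; omega
          rw [heq, hlen, hlen2, ih tl' (pre ++ [a]) mn mx (by simp at h ⊢; omega)]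
          rw [runMin_cons_ne a tl' ha]
          simp [ha]


-- ===== VERDICT (by name: the statement is the Claim_ definition above) =====
theorem revisedRussianRoulette_spec : Claim_equal_revisedRussianRoulette := by
  intro doors _
  unfold Spec_revisedRussianRoulette revisedRussianRoulette revisedRussianRoulette_alt
  have h := aFold_eq doors.length doors [] 0 0 (Nat.le_refl _)
  simp only [List.length_nil, Nat.zero_add, List.nil_append] at h
  rw [List.range_eq_range']
  have hb := bFold_eq_runMin doors 0 0
  rw [Prod.mk.injEq]
  constructor
  · rw [hb, show ((List.foldl (aStep doors.length) (doors, 0, 0) (List.range' 0 doors.length)).2.1 : Int)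
        = (0 : Int) + runMin doors 0 from congrArg Prod.fst h]
  · rw [show ((List.foldl (aStep doors.length) (doors, 0, 0) (List.range' 0 doors.length)).2.2 : Int)
        = (0 : Int) + (doors.count 1 : Int) from congrArg Prod.snd h]
    simp [PySem.List.count_eq]
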